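-- pv_equiv track=rewrite | github.com/ryanGT/report_generation | latex_utils.py | split_table_labels_into_multiple_rows
-- ===== SOURCE A (Python) =====
-- def split_table_labels_into_multiple_rows(labels, breakchar='\\', \
--                                           first_column_blank=False):
--     """For a latex table, I often have long column labels.  I like to
--     manually determine where to break them, and then give each label
--     multiple rows so they look nice.  This can be tedious to format
--     correctly.  This function takes a list of labels that may or may
--     not contain breakchar and converts it to latex code to make nice
--     looking, multi-row labels.  It also determines how many blank rows
--     are needed for labels that are shorter than the longest one."""
--     big_list = []
--     N = 1
--     for label in labels:
--         curlist = label.split(breakchar)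
--         if len(curlist) > N:#determine how many rows are needed to
--                             #format all the labels nicely
--             N = len(curlist)
--         big_list.append(curlist)
--
--     label_list = []
--
--     for i in range(N):
--         currow = []
--         for ent in big_list:
--             n = len(ent)
--             offset = N-n
--             if N-i > n:
--                 currow.append('')
--             else:
--                 currow.append(ent[i-offset])
--         curstr = ' & '.join(currow) + '\\\\'
--         if first_column_blank:
--             curstr = ' & ' + curstr
--         label_list.append(curstr)
--     return label_list
-- ===== SOURCE B (Python) =====
-- def split_table_labels_into_multiple_rows(labels, breakchar='\\', \
--                                           first_column_blank=False):
--     split_lists = [label.split(breakchar) for label in labels]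
--     N = max(map(len, split_lists), default=1)
--     rows = [' & ' if first_column_blank else ''] * N
--     sep = ''
--     for parts in split_lists:
--         rows = [r + sep for r in rows]
--         j = N - len(parts)
--         for part in parts:
--             rows[j] += part
--             j += 1
--         sep = ' & '
--     return [r + '\\\\' for r in rows]
-- ===== Notes on version B (the rewrite author's own statement) =====
-- stated objective: alternative
-- what changed: B is label-major where A is row-major: instead of A's outer loop over row indices with an inner scan doing offset arithmetic, a blank-vs-value branch and a per-row ' & '.join, B makes one pass over the labels, scattering each label's parts into per-row string accumulators (bottom-aligned by direct index writes) and appending separators incrementally; no join and no blank/value branch.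
import Mathlib
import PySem

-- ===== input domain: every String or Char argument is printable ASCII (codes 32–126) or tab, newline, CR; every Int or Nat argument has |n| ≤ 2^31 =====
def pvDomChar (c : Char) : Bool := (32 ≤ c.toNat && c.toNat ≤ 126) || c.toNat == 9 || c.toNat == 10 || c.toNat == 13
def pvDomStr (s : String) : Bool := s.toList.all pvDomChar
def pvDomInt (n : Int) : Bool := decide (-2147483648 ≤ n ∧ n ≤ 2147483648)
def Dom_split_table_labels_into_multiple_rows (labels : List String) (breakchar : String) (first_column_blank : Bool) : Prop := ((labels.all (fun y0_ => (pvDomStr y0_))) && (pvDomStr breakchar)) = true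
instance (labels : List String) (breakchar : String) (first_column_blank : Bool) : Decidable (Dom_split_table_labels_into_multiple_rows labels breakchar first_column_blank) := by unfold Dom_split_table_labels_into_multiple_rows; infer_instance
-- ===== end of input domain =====

-- B replaces A's row-major gather (outer loop over row indices, inner scan with
-- offset arithmetic and a blank-vs-value branch, ' & '.join per row) by a
-- label-major scatter: one pass over the labels writing each label's parts into
-- row-string accumulators, separators appended incrementally (objective: alternative).

-- label.split(breakchar); total form, exact whenever breakchar ≠ "" (guaranteed by Pre_ when used)
def pvSplit (l b : String) : List String := (PySem.Str.split? l b).getD []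

-- ===== PORT A =====
def split_table_labels_into_multiple_rows (labels : List String) (breakchar : String) (first_column_blank : Bool) : List String :=
  let st := labels.foldl (fun (st : List (List String) × Int) label =>
    let curlist := pvSplit label breakchar
    let N := if (curlist.length : Int) > st.2 then (curlist.length : Int) else st.2
    (st.1 ++ [curlist], N)) ([], 1)
  let big_list := st.1
  let N := st.2
  (PySem.List.pyRange 0 N 1).foldl (fun label_list i =>
    let currow := big_list.foldl (fun currow ent =>
      let n : Int := ent.length
      let offset := N - n
      if N - i > n then currow ++ [""]
      else currow ++ [PySem.List.pyGetD ent (i - offset) ""]) []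
    let curstr := PySem.Str.join " & " currow ++ "\\\\"
    let curstr := if first_column_blank then " & " ++ curstr else curstr
    label_list ++ [curstr]) []

-- ===== PORT B =====
def split_table_labels_into_multiple_rows_alt (labels : List String) (breakchar : String) (first_column_blank : Bool) : List String :=
  let split_lists := labels.map (fun label => pvSplit label breakchar)
  let N : Nat := PySem.List.maxD (split_lists.map List.length) (fun x => x) 1
  let st := split_lists.foldl (fun (st : List String × String) parts =>
      ((parts.foldl (fun (q : List String × Nat) part =>
          (q.1.modify q.2 (fun r => r ++ part), q.2 + 1))
          (st.1.map (fun r => r ++ st.2), N - parts.length)).1, " & "))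
    (List.replicate N (if first_column_blank then " & " else ""), "")
  st.1.map (fun r => r ++ "\\\\")

-- ===== PRECONDITION & SPEC =====
-- Pre_ excludes only the inputs where Python A raises: a non-empty labels list with
-- breakchar = "" makes label.split('') raise ValueError.
def Pre_split_table_labels_into_multiple_rows (labels : List String) (breakchar : String) (first_column_blank : Bool) : Prop := labels = [] ∨ breakchar ≠ ""
instance (labels : List String) (breakchar : String) (first_column_blank : Bool) : Decidable (Pre_split_table_labels_into_multiple_rows labels breakchar first_column_blank) := by unfold Pre_split_table_labels_into_multiple_rows; infer_instance
def pvWitness_split_table_labels_into_multiple_rows : List String × String × Bool := (["a\\b", "c"], "\\", false)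

def Spec_split_table_labels_into_multiple_rows (labels : List String) (breakchar : String) (first_column_blank : Bool) (out : List String) : Prop := out = split_table_labels_into_multiple_rows_alt labels breakchar first_column_blank
instance (labels : List String) (breakchar : String) (first_column_blank : Bool) (out : List String) : Decidable (Spec_split_table_labels_into_multiple_rows labels breakchar first_column_blank out) := by unfold Spec_split_table_labels_into_multiple_rows; infer_instance

-- ===== CLAIM (what is proved, stated in full; the proofs are below) =====
def Claim_equal_split_table_labels_into_multiple_rows : Prop := ∀ (labels : List String) (breakchar : String) (first_column_blank : Bool), Dom_split_table_labels_into_multiple_rows labels breakchar first_column_blank → Pre_split_table_labels_into_multiple_rows labels breakchar first_column_blank → Spec_split_table_labels_into_multiple_rows labels breakchar first_column_blank (split_table_labels_into_multiple_rows labels breakchar first_column_blank)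

-- ===== LEMMAS AND PROOFS =====

-- the canonical cell: label p contributes row i its (i - (N-len))-th part, blank above
def pvCell (N : Nat) (p : List String) (i : Nat) : String :=
  if N - p.length ≤ i then p.getD (i - (N - p.length)) "" else ""

-- B's row contents: first cell prefixed by s, later cells by ' & '
def pvJ : String → List String → String
  | _, [] => ""
  | s, c :: t => s ++ c ++ pvJ " & " t

-- the suffix/prefix decoration A puts on each row
def pvOut (fcb : Bool) (s : String) : String :=
  if fcb then " & " ++ (s ++ "\\\\") else s ++ "\\\\"

-- A's first loop computes (map of splits, running max as Int)
theorem pv_stateA (breakchar : String) (labels : List String)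
    (acc : List (List String)) (m : Int) :
    labels.foldl (fun (st : List (List String) × Int) label =>
      let curlist := pvSplit label breakchar
      let N := if (curlist.length : Int) > st.2 then (curlist.length : Int) else st.2
      (st.1 ++ [curlist], N)) (acc, m)
    = (acc ++ labels.map (fun l => pvSplit l breakchar),
       (labels.map (fun l => ((pvSplit l breakchar).length : Int))).foldl max m) := by
  induction labels generalizing acc m with
  | nil => simp
  | cons x t ih =>
    simp only [List.foldl_cons, List.map_cons]
    rw [ih]
    have hmax : (if ((pvSplit x breakchar).length : Int) > m then ((pvSplit x breakchar).length : Int) else m)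
        = max m ((pvSplit x breakchar).length : Int) := by
      split_ifs <;> omega
    rw [hmax]
    simp

-- the Int running max is the cast of the Nat running max
theorem pv_fold_max_cast (ns : List Nat) (m : Nat) :
    (ns.map (Nat.cast : Nat → Int)).foldl max (m : Int) = ((ns.foldl max m : Nat) : Int) := by
  induction ns generalizing m with
  | nil => rfl
  | cons x t ih =>
    rw [List.map_cons, List.foldl_cons, List.foldl_cons, ← Nat.cast_max, ih]

theorem pv_fold_max_cast1 (ns : List Nat) :
    (ns.map (Nat.cast : Nat → Int)).foldl max 1 = ((ns.foldl max 1 : Nat) : Int) := by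
  have h := pv_fold_max_cast ns 1
  simpa using h

-- A's inner loop appends one cell per entry: it is a map
theorem pv_row (N : Nat) (i : Int) (bl : List (List String)) (acc : List String) :
    bl.foldl (fun currow ent =>
      if (N : Int) - i > (ent.length : Int) then currow ++ [""]
      else currow ++ [PySem.List.pyGetD ent (i - ((N : Int) - (ent.length : Int))) ""]) acc
    = acc ++ bl.map (fun ent =>
      if (N : Int) - i > (ent.length : Int) then ""
      else PySem.List.pyGetD ent (i - ((N : Int) - (ent.length : Int))) "") := by
  induction bl generalizing acc with
  | nil => simp
  | cons x t ih =>
    simp only [List.foldl_cons, List.map_cons]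
    split_ifs with h <;> rw [ih] <;> simp

-- one cell of A's row equals the canonical cell
theorem pv_cellA (ent : List String) (k N : Nat) (hle : ent.length ≤ N) :
    (if (N : Int) - (k : Int) > (ent.length : Int) then ""
     else PySem.List.pyGetD ent ((k : Int) - ((N : Int) - (ent.length : Int))) "")
    = pvCell N ent k := by
  unfold pvCell
  by_cases h : N - ent.length ≤ k
  · rw [if_neg (by omega), if_pos h]
    have hsub : (k : Int) - ((N : Int) - (ent.length : Int)) = ((k - (N - ent.length) : Nat) : Int) := by
      omega
    rw [hsub, PySem.List.pyGetD_natCast]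
  · rw [if_pos (by omega), if_neg h]

-- A in canonical form
theorem pv_A_canon (labels : List String) (breakchar : String) (fcb : Bool) :
    split_table_labels_into_multiple_rows labels breakchar fcb
    = (List.range (((labels.map (fun l => pvSplit l breakchar)).map List.length).foldl max 1)).map
        (fun k => pvOut fcb (PySem.Str.join " & "
          ((labels.map (fun l => pvSplit l breakchar)).map
            (fun p => pvCell (((labels.map (fun l => pvSplit l breakchar)).map List.length).foldl max 1) p k)))) := by
  unfold split_table_labels_into_multiple_rows
  rw [pv_stateA]
  dsimp only
  have hcast1 : labels.map (fun l => ((pvSplit l breakchar).length : Int))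
      = ((labels.map (fun l => pvSplit l breakchar)).map List.length).map (Nat.cast : Nat → Int) := by
    rw [List.map_map, List.map_map]; rfl
  rw [hcast1, pv_fold_max_cast1]
  set parts := labels.map (fun l => pvSplit l breakchar) with hparts
  set N : Nat := (parts.map List.length).foldl max 1 with hN
  have hbound : ∀ p ∈ parts, p.length ≤ N := by
    intro p hp
    have h2 := (PySem.List.le_foldl_max_nat parts List.length 1).2 p hp
    rw [hN, List.foldl_map]
    exact h2
  rw [PySem.List.pyRange_one 0 N]
  simp only [Int.sub_zero, Int.toNat_natCast, zero_add]
  rw [PySem.List.foldl_append_singleton_eq_map, List.nil_append, List.map_map]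
  apply List.map_congr_left
  intro k _
  simp only [Function.comp_apply]
  rw [List.nil_append, pv_row N (k : Int) parts [], List.nil_append]
  have hrow : parts.map (fun ent =>
        if (N : Int) - (k : Int) > (ent.length : Int) then ""
        else PySem.List.pyGetD ent ((k : Int) - ((N : Int) - (ent.length : Int))) "")
      = parts.map (fun p => pvCell N p k) := by
    apply List.map_congr_left
    intro p hp
    exact pv_cellA p k N (hbound p hp)
  rw [hrow]
  simp [pvOut]

-- modifying one slot of a row table indexed by range
theorem pv_modify_map_range (N b : Nat) (f : String → String) (g : Nat → String) :
    ((List.range N).map g).modify b f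
    = (List.range N).map (fun i => if b = i then f (g i) else g i) := by
  apply List.ext_getElem (by simp)
  intro j h1 h2
  simp [List.getElem_modify]

-- B's inner loop scatters the parts of one label into rows b, b+1, …
theorem pv_scatter (p : List String) (N : Nat) (b : Nat) (g : Nat → String) :
    (p.foldl (fun (q : List String × Nat) part =>
        (q.1.modify q.2 (fun r => r ++ part), q.2 + 1)) ((List.range N).map g, b)).1
    = (List.range N).map (fun i =>
        g i ++ (if b ≤ i ∧ i < b + p.length then p.getD (i - b) "" else "")) := by
  induction p generalizing g b with
  | nil => simp
  | cons x t ih =>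
    simp only [List.foldl_cons]
    rw [pv_modify_map_range]
    rw [ih (b + 1)]
    apply List.map_congr_left
    intro i _
    by_cases hib : b = i
    · subst hib
      have h1 : ¬ (b + 1 ≤ b ∧ b < b + 1 + t.length) := by omega
      have h2 : b ≤ b ∧ b < b + (x :: t).length := by refine ⟨le_rfl, ?_⟩; simp
      rw [if_pos rfl, if_neg h1, if_pos h2]
      simp
    · rw [if_neg hib]
      congr 1
      by_cases hin : b + 1 ≤ i ∧ i < b + 1 + t.length
      · rw [if_pos hin, if_pos (by simp; omega)]
        have hsub : i - b = (i - (b + 1)) + 1 := by omega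
        rw [hsub]
        simp
      · rw [if_neg hin, if_neg (by simp; omega)]

-- B's outer loop: each row accumulates its cells left-to-right with separators
theorem pv_outer (N : Nat) (L : List (List String)) (g : Nat → String) (s : String) :
    (L.foldl (fun (st : List String × String) parts =>
        ((parts.foldl (fun (q : List String × Nat) part =>
            (q.1.modify q.2 (fun r => r ++ part), q.2 + 1))
            (st.1.map (fun r => r ++ st.2), N - parts.length)).1, " & "))
      ((List.range N).map g, s)).1
    = (List.range N).map (fun i => g i ++ pvJ s (L.map (fun p => pvCell N p i))) := by
  induction L generalizing g s with
  | nil => simp [pvJ]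
  | cons p t ih =>
    simp only [List.foldl_cons]
    have hmap : ((List.range N).map g).map (fun r => r ++ s)
        = (List.range N).map (fun i => g i ++ s) := by
      rw [List.map_map]; rfl
    rw [hmap, pv_scatter p N (N - p.length)]
    rw [ih (fun i => (g i ++ s) ++ (if N - p.length ≤ i ∧ i < N - p.length + p.length then p.getD (i - (N - p.length)) "" else "")) " & "]
    apply List.map_congr_left
    intro i _
    have hseg : (if N - p.length ≤ i ∧ i < N - p.length + p.length then p.getD (i - (N - p.length)) "" else "")
        = pvCell N p i := by
      unfold pvCell
      by_cases h1 : N - p.length ≤ i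
      · by_cases h2 : i < N - p.length + p.length
        · rw [if_pos ⟨h1, h2⟩, if_pos h1]
        · rw [if_neg (fun hc => h2 hc.2), if_pos h1]
          rw [List.getD_eq_default]
          omega
      · rw [if_neg (fun hc => h1 hc.1), if_neg h1]
    rw [hseg]
    simp [pvJ, String.append_assoc]

-- ' & '.join in accumulated form
theorem pv_join_cons (t : List String) (c : String) :
    PySem.Str.join " & " (c :: t) = c ++ pvJ " & " t := by
  induction t generalizing c with
  | nil =>
    refine String.toList_inj.mp ?_
    simp [PySem.Str.toList_join, PySem.Chars.join_singleton, pvJ]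
  | cons d t ih =>
    refine String.toList_inj.mp ?_
    have hd := congrArg String.toList (ih d)
    simp only [PySem.Str.toList_join, List.map_cons] at hd ⊢
    rw [PySem.Chars.join_cons_cons, hd]
    simp [pvJ, String.append_assoc]

theorem pv_pvJ_nil_eq_join (cs : List String) : pvJ "" cs = PySem.Str.join " & " cs := by
  cases cs with
  | nil =>
    refine String.toList_inj.mp ?_
    simp [PySem.Str.toList_join, PySem.Chars.join_nil, pvJ]
  | cons c t =>
    rw [pvJ, pv_join_cons]
    simp

-- split(sep) with sep ≠ '' always yields at least one piece
theorem pv_go_ne_nil (sep : List Char) (fuel : Nat) :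
    ∀ (l cur : List Char) (acc : List (List Char)),
      PySem.Chars.splitOn.go sep fuel l cur acc ≠ [] := by
  induction fuel with
  | zero =>
    intro l cur acc
    simp [PySem.Chars.splitOn.go]
  | succ n ih =>
    intro l cur acc
    cases l with
    | nil => simp [PySem.Chars.splitOn.go]
    | cons c rest =>
      rw [PySem.Chars.splitOn.go]
      split_ifs with h
      · exact ih _ _ _
      · exact ih _ _ _

theorem pv_split_len_pos (l breakchar : String) (h : breakchar ≠ "") :
    1 ≤ (pvSplit l breakchar).length := by
  have hbl : ¬ breakchar.toList.isEmpty = true := by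
    intro hn
    exact h (String.toList_inj.mp (by simpa [List.isEmpty_iff] using hn))
  have hsp := PySem.Str.split?_map l breakchar
  unfold pvSplit
  cases hq : PySem.Str.split? l breakchar with
  | none =>
    rw [hq] at hsp
    simp only [Option.map_none] at hsp
    simp only [PySem.Chars.split?, if_neg hbl] at hsp
    exact absurd hsp (by simp)
  | some ps =>
    simp only [Option.getD_some]
    rw [hq] at hsp
    simp only [Option.map_some] at hsp
    simp only [PySem.Chars.split?, if_neg hbl] at hsp
    have hps : ps.map String.toList = PySem.Chars.splitOn l.toList breakchar.toList :=
      Option.some_injective _ hsp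
    cases ps with
    | nil =>
      unfold PySem.Chars.splitOn at hps
      exact absurd hps.symm (pv_go_ne_nil _ _ _ _ _)
    | cons a b => simp

-- max(lengths, default=1) is the running max from 1 when every length is positive
theorem pv_maxD_eq_foldl (ns : List Nat) (h : ∀ x ∈ ns, 1 ≤ x) :
    PySem.List.maxD ns (fun x => x) 1 = ns.foldl max 1 := by
  cases ns with
  | nil => rfl
  | cons x t =>
    unfold PySem.List.maxD
    rw [PySem.List.max?_id_cons]
    simp only [Option.getD_some, List.foldl_cons]
    rw [Nat.max_eq_right (h x (by simp))]

theorem pv_eq (labels : List String) (breakchar : String) (fcb : Bool)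
    (hpre : labels = [] ∨ breakchar ≠ "") :
    split_table_labels_into_multiple_rows labels breakchar fcb
    = split_table_labels_into_multiple_rows_alt labels breakchar fcb := by
  rw [pv_A_canon]
  simp only [split_table_labels_into_multiple_rows_alt]
  set parts := labels.map (fun l => pvSplit l breakchar) with hparts
  set N : Nat := (parts.map List.length).foldl max 1 with hN
  have hmaxD : PySem.List.maxD (parts.map List.length) (fun x => x) 1 = N := by
    rcases hpre with hnil | hne
    · subst hnil; rfl
    · apply pv_maxD_eq_foldl
      intro x hx
      rw [List.map_map] at hx
      obtain ⟨l, _, rfl⟩ := List.mem_map.mp hx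
      exact pv_split_len_pos l breakchar hne
  rw [hmaxD]
  have hrep : List.replicate N (if fcb then " & " else "")
      = (List.range N).map (fun _ => if fcb then " & " else "") := by
    simp
  rw [hrep, pv_outer, List.map_map]
  apply List.map_congr_left
  intro i _
  simp only [Function.comp_apply]
  rw [pv_pvJ_nil_eq_join]
  cases fcb <;> simp [pvOut, String.append_assoc]

-- ===== VERDICT (by name: the statement is the Claim_ definition above) =====
theorem split_table_labels_into_multiple_rows_spec : Claim_equal_split_table_labels_into_multiple_rows := by
  intro labels breakchar fcb _ hpre
  unfold Spec_split_table_labels_into_multiple_rows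
  exact pv_eq labels breakchar fcb hpre
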